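-- pv_equiv track=rewrite | github.com/PostHog/posthog-ios | scripts/transform-docc.py | extract_parameter_type_from_fragments
-- ===== SOURCE A (Python) =====
-- from typing import Dict, List, Any, Optional
--
-- def extract_parameter_type_from_fragments(declaration_fragments: List[Dict], param_name: str) -> str:
--     """Extract parameter type from declaration fragments for a specific parameter."""
--     # Look for parameter name followed by type in fragments
--     found_param = False
--     for i, fragment in enumerate(declaration_fragments):
--         text = fragment.get("text", "")
--         kind = fragment.get("kind", "")
--
--         if text == param_name and kind == "externalParam":
--             found_param = True
--         elif found_param and kind == "typeIdentifier":
--             return text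
--
--     return "Any"
-- ===== SOURCE B (Python) =====
-- def extract_parameter_type_from_fragments(declaration_fragments, param_name):
--     """Backward dynamic-programming pass: fold the list right-to-left, maintaining
--     (text of the first typeIdentifier in the suffix seen so far, answer for that suffix)."""
--     first_type = None
--     ans = "Any"
--     for fragment in reversed(declaration_fragments):
--         if fragment.get("text", "") == param_name and fragment.get("kind", "") == "externalParam":
--             ans = first_type if first_type is not None else "Any"
--         if fragment.get("kind", "") == "typeIdentifier":
--             first_type = fragment.get("text", "")
--     return ans
-- ===== Notes on version B (the rewrite author's own statement) =====
-- stated objective: alternative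
-- what changed: Replaced A's forward flag-threaded state-machine scan by a single backward (right-to-left) dynamic-programming fold that carries, for each suffix, the first typeIdentifier text and the answer for that suffix.
import Mathlib
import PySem

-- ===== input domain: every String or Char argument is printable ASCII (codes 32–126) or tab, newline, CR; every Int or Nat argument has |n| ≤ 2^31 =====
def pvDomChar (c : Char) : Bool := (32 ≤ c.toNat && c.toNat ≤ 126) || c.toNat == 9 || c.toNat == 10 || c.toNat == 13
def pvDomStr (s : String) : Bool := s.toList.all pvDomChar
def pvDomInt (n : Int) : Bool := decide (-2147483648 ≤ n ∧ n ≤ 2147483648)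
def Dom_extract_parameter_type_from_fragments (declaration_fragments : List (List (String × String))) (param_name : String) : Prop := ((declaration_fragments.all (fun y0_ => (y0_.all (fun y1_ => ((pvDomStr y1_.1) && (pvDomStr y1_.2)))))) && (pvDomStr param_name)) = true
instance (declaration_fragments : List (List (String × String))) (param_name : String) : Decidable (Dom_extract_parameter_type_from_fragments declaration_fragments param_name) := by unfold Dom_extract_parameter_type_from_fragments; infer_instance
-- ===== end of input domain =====

-- B replaces A's forward flag-threaded scan by one backward fold carrying (first typeIdentifier text of the suffix, answer for the suffix); return values proved equal.
-- ===== PORT A =====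
-- fragment.get(key, "") : first-match association-list lookup (Python dict .get)
def fragGet (f : List (String × String)) (k : String) : String :=
  PySem.Dict.getD (PySem.Dict.mk f) k ""

-- the single flag-threaded forward pass of A: found_param carried through the loop
def goA (param_name : String) (frags : List (List (String × String))) (found : Bool) : String :=
  match frags with
  | [] => "Any"
  | fragment :: rest =>
    let text := fragGet fragment "text"
    let kind := fragGet fragment "kind"
    if text == param_name && kind == "externalParam" then goA param_name rest true
    else if found && kind == "typeIdentifier" then text
    else goA param_name rest found

def extract_parameter_type_from_fragments (declaration_fragments : List (List (String × String))) (param_name : String) : String :=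
  goA param_name declaration_fragments false

-- ===== PORT B =====
-- one step of the reversed loop: state = (first_type of the suffix already processed, ans for it)
def stepB (param_name : String) (fragment : List (String × String)) (st : Option String × String) : Option String × String :=
  let ans := if fragGet fragment "text" == param_name && fragGet fragment "kind" == "externalParam"
             then (match st.1 with | some t => t | none => "Any")
             else st.2
  let first_type := if fragGet fragment "kind" == "typeIdentifier"
                    then some (fragGet fragment "text")
                    else st.1
  (first_type, ans)

def extract_parameter_type_from_fragments_alt (declaration_fragments : List (List (String × String))) (param_name : String) : String :=
  (declaration_fragments.foldr (stepB param_name) (none, "Any")).2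

-- ===== PRECONDITION & SPEC =====
def Spec_extract_parameter_type_from_fragments (declaration_fragments : List (List (String × String))) (param_name : String) (out : String) : Prop := out = extract_parameter_type_from_fragments_alt declaration_fragments param_name
instance (declaration_fragments : List (List (String × String))) (param_name : String) (out : String) : Decidable (Spec_extract_parameter_type_from_fragments declaration_fragments param_name out) := by unfold Spec_extract_parameter_type_from_fragments; infer_instance

-- ===== CLAIM (what is proved, stated in full; the proofs are below) =====
def Claim_equal_extract_parameter_type_from_fragments : Prop := ∀ (declaration_fragments : List (List (String × String))) (param_name : String), Dom_extract_parameter_type_from_fragments declaration_fragments param_name → Spec_extract_parameter_type_from_fragments declaration_fragments param_name (extract_parameter_type_from_fragments declaration_fragments param_name)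

-- ===== LEMMAS AND PROOFS =====
-- the full invariant of B's backward fold: first component is the first typeIdentifier's
-- text in the suffix, second is A's result on the suffix with the flag still unset
lemma goA_true (param_name : String) (frags : List (List (String × String))) :
    goA param_name frags true =
      match frags.find? (fun g => fragGet g "kind" == "typeIdentifier") with
      | none => "Any"
      | some g => fragGet g "text" := by
  induction frags with
  | nil => simp [goA]
  | cons g rs ihr =>
    by_cases hk : (fragGet g "kind" == "typeIdentifier") = true
    · have hk' : fragGet g "kind" = "typeIdentifier" := eq_of_beq hk
      have hp : (fragGet g "text" == param_name && fragGet g "kind" == "externalParam") = false := by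
        simp [hk']
      simp [goA, List.find?, hk, hp]
    · have hk' : (fragGet g "kind" == "typeIdentifier") = false := by simpa using hk
      simp [goA, List.find?, hk', ihr]

-- the full invariant of B's backward fold: first component is the first typeIdentifier's
-- text in the suffix, second is A's result on the suffix with the flag still unset
lemma foldr_stepB (param_name : String) (frags : List (List (String × String))) :
    frags.foldr (stepB param_name) (none, "Any") =
      ((frags.find? (fun f => fragGet f "kind" == "typeIdentifier")).map (fun f => fragGet f "text"),
       goA param_name frags false) := by
  induction frags with
  | nil => simp [goA]
  | cons f rest ih =>
    simp only [List.foldr_cons, ih, stepB, goA, List.find?]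
    by_cases hp : (fragGet f "text" == param_name && fragGet f "kind" == "externalParam") = true
    · have hk : fragGet f "kind" = "externalParam" :=
        eq_of_beq ((Bool.and_eq_true _ _).mp hp).2
      have hkt : (fragGet f "kind" == "typeIdentifier") = false := by simp [hk]
      simp [hp, hkt, goA_true]
      cases (rest.find? (fun g => fragGet g "kind" == "typeIdentifier")) <;> simp
    · have hp' : (fragGet f "text" == param_name && fragGet f "kind" == "externalParam") = false := by
        simpa using hp
      cases hkt : (fragGet f "kind" == "typeIdentifier") with
      | true => simp [hp', hkt]
      | false => simp [hp', hkt]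

-- ===== VERDICT (by name: the statement is the Claim_ definition above) =====
theorem extract_parameter_type_from_fragments_spec : Claim_equal_extract_parameter_type_from_fragments := by
  intro frags param_name _
  unfold Spec_extract_parameter_type_from_fragments extract_parameter_type_from_fragments
    extract_parameter_type_from_fragments_alt
  rw [foldr_stepB]
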